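-- pv_equiv track=rewrite | github.com/hew123/python_debug | calories.py | itertoolsRecursive
-- ===== SOURCE A (Python) =====
-- def itertoolsRecursive(calCounts,requiredCals):
--     from itertools import combinations
--     combi = []
--     for i in range(2,len(calCounts)):
--         result = combinations(calCounts,i)
--         for item in result:
--             combi.append(list(item))
--
--     for x in combi:
--         if sum(x) == requiredCals:
--             return True
--
--     return False
-- ===== SOURCE B (Python) =====
-- def itertoolsRecursive(calCounts, requiredCals):
--     # Subset-sum DP over (count, sum): sums[c] = set of sums achievable by
--     # choosing exactly c elements from the prefix processed so far.
--     n = len(calCounts)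
--     cap = n - 1
--     if cap < 2:
--         return False
--     sums = [{0}] + [set() for _ in range(cap)]
--     for v in calCounts:
--         sums = [sums[0]] + [sums[c + 1] | {s + v for s in sums[c]} for c in range(cap)]
--     return any(requiredCals in S for S in sums[2:])
-- ===== Notes on version B (the rewrite author's own statement) =====
-- stated objective: faster
-- what changed: Replaced the explicit enumeration of all combinations of sizes 2..n-1 (materialised into one big list, then scanned) by a subset-sum dynamic programme that keeps, for each count c <= n-1, the set of sums reachable with exactly c elements.
import Mathlib
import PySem

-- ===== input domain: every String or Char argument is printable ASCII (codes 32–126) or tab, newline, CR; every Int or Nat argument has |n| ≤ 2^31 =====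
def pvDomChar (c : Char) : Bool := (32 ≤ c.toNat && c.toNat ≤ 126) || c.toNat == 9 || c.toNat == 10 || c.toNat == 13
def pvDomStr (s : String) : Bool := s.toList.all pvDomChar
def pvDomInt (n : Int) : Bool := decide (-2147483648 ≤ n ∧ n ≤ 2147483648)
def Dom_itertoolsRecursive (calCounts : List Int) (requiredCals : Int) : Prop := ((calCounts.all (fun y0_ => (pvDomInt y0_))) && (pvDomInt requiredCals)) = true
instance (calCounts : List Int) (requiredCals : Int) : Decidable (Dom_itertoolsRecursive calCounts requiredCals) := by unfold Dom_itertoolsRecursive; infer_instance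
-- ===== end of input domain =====

-- B replaces A's explicit enumeration of all combinations of sizes 2..n-1 with a
-- subset-sum DP over (count, sum) using sets of reachable sums (objective: faster).

-- ===== PORT A =====
-- itertools.combinations(l, k), in itertools' order (tuples as lists)
def combosA : Nat → List Int → List (List Int)
  | 0, _ => [[]]
  | _ + 1, [] => []
  | k + 1, x :: xs => (combosA k xs).map (fun t => x :: t) ++ combosA (k + 1) xs

def itertoolsRecursive (calCounts : List Int) (requiredCals : Int) : Bool :=
  -- combi = []; for i in range(2, len(calCounts)): for item in combinations(calCounts, i): combi.append(list(item))
  let combi := (PySem.List.pyRange 2 (calCounts.length : Int) 1).foldl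
    (fun acc i => acc ++ combosA i.toNat calCounts) []
  -- for x in combi: if sum(x) == requiredCals: return True // return False
  combi.any (fun x => x.sum == requiredCals)

-- ===== PORT B =====
-- one DP step: given sums[c] (= prev) and the tail sums[c+1..], produce the new tail:
-- new sums[c+1] = sums[c+1] | {s + v for s in sums[c]}
def stepAux (v : Int) (prev : PySem.Set Int) : List (PySem.Set Int) → List (PySem.Set Int)
  | [] => []
  | t :: rest => PySem.Set.union t (PySem.Set.ofList (prev.map (fun s => s + v))) :: stepAux v t rest

-- sums = [sums[0]] + [sums[c+1] | {s+v for s in sums[c]} for c in range(cap)]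
def stepB (v : Int) : List (PySem.Set Int) → List (PySem.Set Int)
  | [] => []
  | s0 :: rest => s0 :: stepAux v s0 rest

def itertoolsRecursive_alt (calCounts : List Int) (requiredCals : Int) : Bool :=
  let cap : Int := (calCounts.length : Int) - 1
  if cap < 2 then false
  else
    -- sums = [{0}] + [set() for _ in range(cap)]
    let init : List (PySem.Set Int) := PySem.Set.ofList [0] :: List.replicate cap.toNat PySem.Set.empty
    let sums := calCounts.foldl (fun sums v => stepB v sums) init
    -- any(requiredCals in S for S in sums[2:])
    (PySem.List.slice sums (some 2) none).any (fun S => PySem.Set.contains S requiredCals)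

-- ===== PRECONDITION & SPEC =====
def Spec_itertoolsRecursive (calCounts : List Int) (requiredCals : Int) (out : Bool) : Prop := out = itertoolsRecursive_alt calCounts requiredCals
instance (calCounts : List Int) (requiredCals : Int) (out : Bool) : Decidable (Spec_itertoolsRecursive calCounts requiredCals out) := by unfold Spec_itertoolsRecursive; infer_instance

-- ===== CLAIM (what is proved, stated in full; the proofs are below) =====
def Claim_equal_itertoolsRecursive : Prop := ∀ (calCounts : List Int) (requiredCals : Int), Dom_itertoolsRecursive calCounts requiredCals → Spec_itertoolsRecursive calCounts requiredCals (itertoolsRecursive calCounts requiredCals)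

-- ===== LEMMAS AND PROOFS =====

lemma mem_combosA (l : List Int) : ∀ (k : Nat) (sub : List Int),
    sub ∈ combosA k l ↔ sub.Sublist l ∧ sub.length = k := by
  induction l with
  | nil =>
    intro k sub
    cases k with
    | zero => simp [combosA, List.length_eq_zero_iff]
    | succ k =>
      simp only [combosA, List.not_mem_nil, false_iff]
      rintro ⟨hs, hl⟩
      have := List.sublist_nil.mp hs
      simp [this] at hl
  | cons x xs ih =>
    intro k sub
    cases k with
    | zero =>
      simp only [combosA, List.mem_singleton]
      constructor
      · rintro rfl; exact ⟨List.nil_sublist _, rfl⟩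
      · rintro ⟨_, hl⟩; exact List.length_eq_zero_iff.mp hl
    | succ k =>
      simp only [combosA, List.mem_append, List.mem_map, ih]
      rw [List.sublist_cons_iff]
      constructor
      · rintro (⟨t, ⟨hts, htl⟩, rfl⟩ | ⟨hs, hl⟩)
        · exact ⟨Or.inr ⟨t, rfl, hts⟩, by simp [htl]⟩
        · exact ⟨Or.inl hs, hl⟩
      · rintro ⟨hs | ⟨r, rfl, hr⟩, hl⟩
        · exact Or.inr ⟨hs, hl⟩
        · exact Or.inl ⟨r, ⟨hr, by simpa using hl⟩, rfl⟩

-- sub is a sublist of P ++ [v] iff it is one of P, or it is one of P with v appended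
lemma sublist_concat_iff (sub P : List Int) (v : Int) :
    sub.Sublist (P ++ [v]) ↔ sub.Sublist P ∨ ∃ r, sub = r ++ [v] ∧ r.Sublist P := by
  rw [List.sublist_append_iff]
  constructor
  · rintro ⟨r₁, r₂, rfl, h₁, h₂⟩
    rcases List.sublist_cons_iff.mp h₂ with h | ⟨r, hr2, hr⟩
    · exact Or.inl (by simpa [List.sublist_nil.mp h] using h₁)
    · rcases List.sublist_nil.mp hr with rfl
      exact Or.inr ⟨r₁, by rw [hr2], h₁⟩
  · rintro (h | ⟨r, rfl, hr⟩)
    · exact ⟨sub, [], by simp, h, List.nil_sublist _⟩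
    · exact ⟨r, [v], rfl, hr, List.Sublist.refl _⟩

-- A returns true iff some sublist of size 2..n-1 sums to the target
lemma A_iff (l : List Int) (t : Int) :
    itertoolsRecursive l t = true ↔
      ∃ k : Nat, 2 ≤ k ∧ (k : Int) < (l.length : Int) ∧
        ∃ sub : List Int, sub.Sublist l ∧ sub.length = k ∧ sub.sum = t := by
  unfold itertoolsRecursive
  rw [PySem.List.foldl_append_eq_flatMap]
  simp only [List.nil_append, List.any_eq_true, List.mem_flatMap,
    PySem.List.mem_pyRange_one, beq_iff_eq]
  constructor
  · rintro ⟨x, ⟨i, ⟨h2, hlt⟩, hx⟩, hsum⟩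
    rcases (mem_combosA l i.toNat x).mp hx with ⟨hs, hl⟩
    refine ⟨i.toNat, by omega, by omega, x, hs, hl, hsum⟩
  · rintro ⟨k, h2, hlt, sub, hs, hl, hsum⟩
    exact ⟨sub, ⟨(k : Int), ⟨by exact_mod_cast h2, hlt⟩,
      (mem_combosA l k sub).mpr ⟨hs, by simpa using hl⟩⟩, hsum⟩

-- S is exactly the set of sums of length-c sublists of P
def Good (P : List Int) (c : Nat) (S : PySem.Set Int) : Prop :=
  ∀ s, s ∈ S ↔ ∃ sub : List Int, sub.Sublist P ∧ sub.length = c ∧ sub.sum = s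

-- the DP invariant for the list of sets starting at count c
def InvFrom (P : List Int) : Nat → List (PySem.Set Int) → Prop
  | _, [] => True
  | c, S :: rest => Good P c S ∧ InvFrom P (c + 1) rest

lemma good_zero (P : List Int) : Good P 0 (PySem.Set.ofList [0]) := by
  intro s
  simp only [PySem.Set.mem_ofList, List.mem_singleton]
  constructor
  · rintro rfl; exact ⟨[], List.nil_sublist _, rfl, rfl⟩
  · rintro ⟨sub, _, hl, hsum⟩
    rw [List.length_eq_zero_iff.mp hl] at hsum
    exact hsum.symm

lemma good_empty_nil (c : Nat) (hc : 0 < c) : Good [] c PySem.Set.empty := by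
  intro s
  simp only [PySem.Set.empty, List.not_mem_nil, false_iff]
  rintro ⟨sub, hs, hl, _⟩
  rw [List.sublist_nil.mp hs] at hl
  simp at hl; omega

lemma invFrom_replicate_nil : ∀ (m c : Nat), 0 < c →
    InvFrom [] c (List.replicate m PySem.Set.empty) := by
  intro m
  induction m with
  | zero => intro c _; trivial
  | succ m ih =>
    intro c hc
    exact ⟨good_empty_nil c hc, ih (c + 1) (by omega)⟩

lemma invFrom_stepAux (P : List Int) (v : Int) :
    ∀ (rest : List (PySem.Set Int)) (c : Nat) (prev : PySem.Set Int),
      Good P c prev → InvFrom P (c + 1) rest →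
      InvFrom (P ++ [v]) (c + 1) (stepAux v prev rest) := by
  intro rest
  induction rest with
  | nil => intro c prev _ _; trivial
  | cons t rest ih =>
    intro c prev hprev hinv
    obtain ⟨ht, htail⟩ := hinv
    refine ⟨?_, ih (c + 1) t ht htail⟩
    intro s
    rw [PySem.Set.mem_union]
    simp only [PySem.Set.mem_ofList, List.mem_map]
    rw [ht s]
    constructor
    · rintro (⟨sub, hs, hl, hsum⟩ | ⟨p, hp, rfl⟩)
      · exact ⟨sub, (sublist_concat_iff sub P v).mpr (Or.inl hs), hl, hsum⟩
      · rcases (hprev p).mp hp with ⟨sub, hs, hl, hsum⟩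
        exact ⟨sub ++ [v], (sublist_concat_iff _ P v).mpr (Or.inr ⟨sub, rfl, hs⟩),
          by simp [hl], by simp [hsum]⟩
    · rintro ⟨sub, hs, hl, hsum⟩
      rcases (sublist_concat_iff sub P v).mp hs with h | ⟨r, rfl, hr⟩
      · exact Or.inl ⟨sub, h, hl, hsum⟩
      · refine Or.inr ⟨r.sum, (hprev r.sum).mpr ⟨r, hr, by simpa using hl, rfl⟩, ?_⟩
        simpa using hsum
    
lemma invFrom_stepB (P : List Int) (v : Int) (sums : List (PySem.Set Int))
    (h : InvFrom P 0 sums) : InvFrom (P ++ [v]) 0 (stepB v sums) := by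
  cases sums with
  | nil => trivial
  | cons s0 rest =>
    obtain ⟨h0, htail⟩ := h
    refine ⟨?_, invFrom_stepAux P v rest 0 s0 h0 htail⟩
    intro s
    rw [h0 s]
    constructor
    · rintro ⟨sub, _, hl, hsum⟩
      exact ⟨sub, by rw [List.length_eq_zero_iff.mp hl]; exact List.nil_sublist _, hl, hsum⟩
    · rintro ⟨sub, _, hl, hsum⟩
      exact ⟨sub, by rw [List.length_eq_zero_iff.mp hl]; exact List.nil_sublist _, hl, hsum⟩

lemma invFrom_foldl : ∀ (l P : List Int) (sums : List (PySem.Set Int)),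
    InvFrom P 0 sums →
    InvFrom (P ++ l) 0 (l.foldl (fun s v => stepB v s) sums) := by
  intro l
  induction l with
  | nil => intro P sums h; simpa using h
  | cons v l ih =>
    intro P sums h
    have := ih (P ++ [v]) (stepB v sums) (invFrom_stepB P v sums h)
    simpa using this

lemma invFrom_drop (P : List Int) : ∀ (m : Nat) (L : List (PySem.Set Int)) (c : Nat),
    InvFrom P c L → InvFrom P (c + m) (L.drop m) := by
  intro m
  induction m with
  | zero => intro L c h; simpa using h
  | succ m ih =>
    intro L c h
    cases L with
    | nil => trivial
    | cons S rest =>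
      have hmm := ih rest (c + 1) h.2
      have heq : c + (m + 1) = c + 1 + m := by omega
      rw [List.drop_succ_cons, heq]
      exact hmm

lemma length_stepAux (v : Int) : ∀ (prev : PySem.Set Int) (rest : List (PySem.Set Int)),
    (stepAux v prev rest).length = rest.length := by
  intro prev rest
  induction rest generalizing prev with
  | nil => rfl
  | cons t rest ih => simp [stepAux, ih t]

lemma length_stepB (v : Int) (sums : List (PySem.Set Int)) :
    (stepB v sums).length = sums.length := by
  cases sums with
  | nil => rfl
  | cons s0 rest => simp [stepB, length_stepAux]

lemma length_foldl_stepB : ∀ (l : List Int) (sums : List (PySem.Set Int)),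
    (l.foldl (fun s v => stepB v s) sums).length = sums.length := by
  intro l
  induction l with
  | nil => intro sums; rfl
  | cons v l ih => intro sums; rw [List.foldl_cons, ih, length_stepB]

lemma any_invFrom (P : List Int) (t : Int) : ∀ (L : List (PySem.Set Int)) (c : Nat),
    InvFrom P c L →
    (L.any (fun S => PySem.Set.contains S t) = true ↔
      ∃ k : Nat, c ≤ k ∧ k < c + L.length ∧
        ∃ sub : List Int, sub.Sublist P ∧ sub.length = k ∧ sub.sum = t) := by
  intro L
  induction L with
  | nil =>
    intro c _
    simp only [List.any_nil, Bool.false_eq_true, false_iff]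
    rintro ⟨k, hk1, hk2, -⟩
    simp only [List.length_nil, Nat.add_zero] at hk2
    omega
  | cons S rest ih =>
    intro c h
    obtain ⟨hS, htail⟩ := h
    simp only [List.any_cons, Bool.or_eq_true, PySem.Set.contains_iff, ih (c + 1) htail, hS t]
    constructor
    · rintro (⟨sub, hs, hl, hsum⟩ | ⟨k, hk1, hk2, w⟩)
      · exact ⟨c, le_refl c, by simp, sub, hs, hl, hsum⟩
      · exact ⟨k, by omega, by simp; omega, w⟩
    · rintro ⟨k, hk1, hk2, sub, hs, hl, hsum⟩
      rcases Nat.eq_or_lt_of_le hk1 with rfl | hlt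
      · exact Or.inl ⟨sub, hs, hl, hsum⟩
      · exact Or.inr ⟨k, by omega, by simp at hk2 ⊢; omega, sub, hs, hl, hsum⟩

-- B returns true iff some sublist of size 2..n-1 sums to the target
lemma B_iff (l : List Int) (t : Int) :
    itertoolsRecursive_alt l t = true ↔
      ∃ k : Nat, 2 ≤ k ∧ (k : Int) < (l.length : Int) ∧
        ∃ sub : List Int, sub.Sublist l ∧ sub.length = k ∧ sub.sum = t := by
  unfold itertoolsRecursive_alt
  by_cases hcap : ((l.length : Int) - 1) < 2
  · simp only [hcap, if_true, Bool.false_eq_true, false_iff]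
    rintro ⟨k, hk1, hk2, -⟩
    omega
  · simp only [hcap, if_false]
    set cap : Int := (l.length : Int) - 1 with hcapdef
    have hcap3 : 3 ≤ l.length := by omega
    have hinit : InvFrom [] 0
        (PySem.Set.ofList [0] :: List.replicate cap.toNat PySem.Set.empty) :=
      ⟨good_zero [], invFrom_replicate_nil cap.toNat 1 (by omega)⟩
    have hinv := invFrom_foldl l []
      (PySem.Set.ofList [0] :: List.replicate cap.toNat PySem.Set.empty) hinit
    rw [List.nil_append] at hinv
    set sums := l.foldl (fun s v => stepB v s)
      (PySem.Set.ofList [0] :: List.replicate cap.toNat PySem.Set.empty) with hsums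
    have hlen : sums.length = cap.toNat + 1 := by
      rw [hsums, length_foldl_stepB]; simp
    have hdrop := invFrom_drop l 2 sums 0 hinv
    rw [PySem.List.slice_from sums (by norm_num : (0:Int) ≤ 2)]
    have h2 : Int.toNat 2 = 2 := rfl
    rw [h2]
    rw [any_invFrom l t (sums.drop 2) 2 (by simpa using hdrop)]
    simp only [List.length_drop, hlen]
    constructor
    · rintro ⟨k, hk1, hk2, w⟩
      exact ⟨k, hk1, by omega, w⟩
    · rintro ⟨k, hk1, hk2, w⟩
      exact ⟨k, hk1, by omega, w⟩

-- ===== VERDICT (by name: the statement is the Claim_ definition above) =====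
theorem itertoolsRecursive_spec : Claim_equal_itertoolsRecursive := by
  intro calCounts requiredCals _
  unfold Spec_itertoolsRecursive
  rcases hA : itertoolsRecursive calCounts requiredCals with _ | _
  · rcases hB : itertoolsRecursive_alt calCounts requiredCals with _ | _
    · rfl
    · rw [← hA]
      exact (A_iff calCounts requiredCals).mpr ((B_iff calCounts requiredCals).mp hB)
  · exact ((B_iff calCounts requiredCals).mpr ((A_iff calCounts requiredCals).mp hA)).symm
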